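-- pv_equiv track=rewrite | github.com/altosun155-kai/Smahbros | routers/brackets.py | _compute_round_participants
-- ===== SOURCE A (Python) =====
-- def _compute_round_participants(bracket_data: list, round_winners: dict) -> dict:
--     """Return {ri: {mi: (a_label, b_label)}} reconstructing all rounds from bracket_data."""
--     if not bracket_data:
--         return {}
--     result = {0: {mi: (p.get("a", ""), p.get("b", "")) for mi, p in enumerate(bracket_data)}}
--     ri = 0
--     while len(result[ri]) > 1:
--         prev = result[ri]
--         next_round = {}
--         sorted_mis = sorted(prev.keys())
--         for j in range(0, len(sorted_mis), 2):
--             if j + 1 >= len(sorted_mis):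
--                 break
--             ma, mb = sorted_mis[j], sorted_mis[j + 1]
--             next_round[j // 2] = (
--                 round_winners.get(f"r{ri}_m{ma}", ""),
--                 round_winners.get(f"r{ri}_m{mb}", ""),
--             )
--         result[ri + 1] = next_round
--         ri += 1
--     return result
-- ===== SOURCE B (Python) =====
-- def _compute_round_participants(bracket_data: list, round_winners: dict) -> dict:
--     """Closed form: there are n.bit_length() rounds and round ri has n >> ri matches
--     (n = len(bracket_data)); each round is filled directly by index, no loop state."""
--     n = len(bracket_data)
--     return {
--         ri: (
--             {mi: (p.get("a", ""), p.get("b", "")) for mi, p in enumerate(bracket_data)}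
--             if ri == 0
--             else {
--                 k: (round_winners.get(f"r{ri - 1}_m{2 * k}", ""),
--                     round_winners.get(f"r{ri - 1}_m{2 * k + 1}", ""))
--                 for k in range(n >> ri)
--             }
--         )
--         for ri in range(n.bit_length())
--     }
-- ===== Notes on version B (the rewrite author's own statement) =====
-- stated objective: alternative
-- what changed: B replaces A's stateful while loop (which reads back the just-built round's keys, sorts them and pairs them with a break-guarded step-2 loop) by a closed form: n.bit_length() rounds, round ri having n >> ri matches, built in one dict comprehension with no loop-carried state.
import Mathlib
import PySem

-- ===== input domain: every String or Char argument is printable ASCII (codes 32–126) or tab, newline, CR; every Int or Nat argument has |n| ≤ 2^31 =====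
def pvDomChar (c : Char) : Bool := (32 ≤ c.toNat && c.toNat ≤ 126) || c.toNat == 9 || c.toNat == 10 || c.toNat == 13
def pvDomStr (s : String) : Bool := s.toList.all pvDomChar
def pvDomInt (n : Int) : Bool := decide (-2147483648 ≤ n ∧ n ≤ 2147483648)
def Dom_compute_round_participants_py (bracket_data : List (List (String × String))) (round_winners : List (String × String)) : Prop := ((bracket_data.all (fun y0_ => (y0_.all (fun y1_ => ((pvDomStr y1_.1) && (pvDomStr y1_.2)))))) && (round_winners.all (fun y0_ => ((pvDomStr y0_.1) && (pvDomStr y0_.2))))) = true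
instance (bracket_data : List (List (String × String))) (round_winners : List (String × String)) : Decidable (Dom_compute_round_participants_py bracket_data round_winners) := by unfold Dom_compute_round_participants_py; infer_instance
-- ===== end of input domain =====

-- B replaces A's stateful while loop over the previous round's sorted keys by a closed
-- form (bit_length rounds, round ri has n >> ri matches); equality of return values is proved.

-- ===== PORT A =====
-- the inner 'for j in range(0, len(sorted_mis), 2)' with its 'break' at a leftover
-- single key, consumed two keys at a time; k = j // 2
def aPairs (round_winners : List (String × String)) (ri : Int) (k : Int) :
    List Int → List (Int × String × String)
  | ma :: mb :: rest =>
      (k,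
        (PySem.Dict.mk round_winners).getD ("r" ++ PySem.Int.toStr ri ++ "_m" ++ PySem.Int.toStr ma) "",
        (PySem.Dict.mk round_winners).getD ("r" ++ PySem.Int.toStr ri ++ "_m" ++ PySem.Int.toStr mb) "")
        :: aPairs round_winners ri (k + 1) rest
  | _ => []

theorem aPairs_length (round_winners : List (String × String)) (ri k : Int) :
    ∀ l : List Int, (aPairs round_winners ri k l).length = l.length / 2
  | [] => by simp [aPairs]
  | [_] => by simp [aPairs]
  | _ :: _ :: rest => by
      simp only [aPairs, List.length_cons, aPairs_length round_winners ri (k + 1) rest]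
      omega

-- the 'while len(result[ri]) > 1' loop; each iteration emits the next round
def aWhile (round_winners : List (String × String)) (ri : Int)
    (prev : List (Int × String × String)) : List (Int × List (Int × String × String)) :=
  if h : prev.length > 1 then
    (ri + 1, aPairs round_winners ri 0 (PySem.List.sorted (prev.map Prod.fst) (fun x => x) false))
      :: aWhile round_winners (ri + 1)
           (aPairs round_winners ri 0 (PySem.List.sorted (prev.map Prod.fst) (fun x => x) false))
  else []
termination_by prev.length
decreasing_by
  rw [aPairs_length, PySem.List.length_sorted, List.length_map, List.length_attach]
  omega

def compute_round_participants_py (bracket_data : List (List (String × String))) (round_winners : List (String × String)) : List (Int × List (Int × String × String)) :=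
  if bracket_data = [] then []
  else
    (0, (PySem.List.enumerate bracket_data).map
      (fun mp => (mp.1, (PySem.Dict.mk mp.2).getD "a" "", (PySem.Dict.mk mp.2).getD "b" "")))
    :: aWhile round_winners 0
      ((PySem.List.enumerate bracket_data).map
        (fun mp => (mp.1, (PySem.Dict.mk mp.2).getD "a" "", (PySem.Dict.mk mp.2).getD "b" "")))

-- ===== PORT B =====
-- n.bit_length() for a nonnegative n, ported by hand (exact for Nat)
def pyBitLength (n : Nat) : Nat :=
  if n = 0 then 0 else pyBitLength (n / 2) + 1
termination_by n
decreasing_by omega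

-- the inner comprehension {k: (winner(2k), winner(2k+1)) for k in range(c)}, label round ri
def bRound (round_winners : List (String × String)) (ri : Int) (c : Nat) :
    List (Int × String × String) :=
  (List.range c).map (fun k =>
    (Int.ofNat k,
      (PySem.Dict.mk round_winners).getD ("r" ++ PySem.Int.toStr ri ++ "_m" ++ PySem.Int.toStr (Int.ofNat (2 * k))) "",
      (PySem.Dict.mk round_winners).getD ("r" ++ PySem.Int.toStr ri ++ "_m" ++ PySem.Int.toStr (Int.ofNat (2 * k + 1))) ""))

def compute_round_participants_py_alt (bracket_data : List (List (String × String))) (round_winners : List (String × String)) : List (Int × List (Int × String × String)) :=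
  (List.range (pyBitLength bracket_data.length)).map (fun ri =>
    (Int.ofNat ri,
      if ri = 0 then
        (PySem.List.enumerate bracket_data).map
          (fun mp => (mp.1, (PySem.Dict.mk mp.2).getD "a" "", (PySem.Dict.mk mp.2).getD "b" ""))
      else bRound round_winners (Int.ofNat ri - 1) (bracket_data.length >>> ri)))

-- ===== PRECONDITION & SPEC =====
def Spec_compute_round_participants_py (bracket_data : List (List (String × String))) (round_winners : List (String × String)) (out : List (Int × List (Int × String × String))) : Prop := out = compute_round_participants_py_alt bracket_data round_winners
instance (bracket_data : List (List (String × String))) (round_winners : List (String × String)) (out : List (Int × List (Int × String × String))) : Decidable (Spec_compute_round_participants_py bracket_data round_winners out) := by unfold Spec_compute_round_participants_py; infer_instance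

-- ===== CLAIM (what is proved, stated in full; the proofs are below) =====
def Claim_equal_compute_round_participants_py : Prop := ∀ (bracket_data : List (List (String × String))) (round_winners : List (String × String)), Dom_compute_round_participants_py bracket_data round_winners → Spec_compute_round_participants_py bracket_data round_winners (compute_round_participants_py bracket_data round_winners)

-- ===== LEMMAS AND PROOFS =====

-- proof-only recursive view of the tail of rounds produced for a round of size s
def bTailAux (round_winners : List (String × String)) (ri : Int) (s : Nat) :
    List (Int × List (Int × String × String)) :=
  if s > 1 then (ri + 1, bRound round_winners ri (s / 2)) :: bTailAux round_winners (ri + 1) (s / 2)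
  else []
termination_by s
decreasing_by omega

-- A's pairing of the increasing key run [2k, 2k+1, …] is B's indexed round
theorem aPairs_range' (round_winners : List (String × String)) (ri : Int) :
    ∀ (m k : Nat),
      aPairs round_winners ri (Int.ofNat k) ((List.range' (2 * k) m).map Int.ofNat)
      = (List.range' k (m / 2)).map (fun j =>
          (Int.ofNat j,
            (PySem.Dict.mk round_winners).getD ("r" ++ PySem.Int.toStr ri ++ "_m" ++ PySem.Int.toStr (Int.ofNat (2 * j))) "",
            (PySem.Dict.mk round_winners).getD ("r" ++ PySem.Int.toStr ri ++ "_m" ++ PySem.Int.toStr (Int.ofNat (2 * j + 1))) "")) := by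
  intro m
  induction m using Nat.strong_induction_on with
  | _ m ih =>
    intro k
    match m with
    | 0 => simp [aPairs]
    | 1 => simp [List.range', aPairs]
    | (m + 2) =>
      have hhalf : (m + 2) / 2 = m / 2 + 1 := by omega
      have h2 : 2 * k + 1 + 1 = 2 * (k + 1) := by ring
      have hk : (Int.ofNat k) + 1 = Int.ofNat (k + 1) := by simp
      rw [List.range'_succ, List.range'_succ, List.map_cons, List.map_cons, aPairs,
        hhalf, List.range'_succ, List.map_cons]
      rw [h2, hk, ih m (by omega) (k + 1)]

-- core loop correspondence: while prev's keys are 0..s-1, A's while loop is the recursive view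
theorem aWhile_eq_bTailAux (round_winners : List (String × String)) :
    ∀ (s : Nat) (ri : Int) (prev : List (Int × String × String)),
      prev.map Prod.fst = (List.range s).map Int.ofNat →
      aWhile round_winners ri prev = bTailAux round_winners ri s := by
  intro s
  induction s using Nat.strong_induction_on with
  | _ s ih =>
    intro ri prev hkeys
    have hlen : prev.length = s := by
      have := congrArg List.length hkeys
      simpa using this
    rw [aWhile, bTailAux, hlen]
    by_cases hs : s > 1
    · rw [dif_pos hs, if_pos hs]
      have hsorted : PySem.List.sorted (prev.map Prod.fst) (fun x => x) false
          = (List.range s).map Int.ofNat := by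
        apply PySem.List.sorted_eq_of_perm_of_pairwise_lt
        · rw [hkeys]
        · refine List.Pairwise.map _ (fun a b h => ?_) List.pairwise_lt_range
          exact Int.ofNat_lt.mpr h
      have h0 : aPairs round_winners ri 0 ((List.range s).map Int.ofNat)
          = (List.range' 0 (s / 2)).map (fun j =>
              (Int.ofNat j,
                (PySem.Dict.mk round_winners).getD ("r" ++ PySem.Int.toStr ri ++ "_m" ++ PySem.Int.toStr (Int.ofNat (2 * j))) "",
                (PySem.Dict.mk round_winners).getD ("r" ++ PySem.Int.toStr ri ++ "_m" ++ PySem.Int.toStr (Int.ofNat (2 * j + 1))) "")) := by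
        have := aPairs_range' round_winners ri s 0
        simpa [List.range_eq_range'] using this
      have hb : bRound round_winners ri (s / 2)
          = (List.range' 0 (s / 2)).map (fun j =>
              (Int.ofNat j,
                (PySem.Dict.mk round_winners).getD ("r" ++ PySem.Int.toStr ri ++ "_m" ++ PySem.Int.toStr (Int.ofNat (2 * j))) "",
                (PySem.Dict.mk round_winners).getD ("r" ++ PySem.Int.toStr ri ++ "_m" ++ PySem.Int.toStr (Int.ofNat (2 * j + 1))) "")) := by
        rw [bRound, List.range_eq_range']
      rw [hsorted, h0, ← hb]
      congr 1
      refine ih (s / 2) (by omega) (ri + 1) _ ?_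
      simp [bRound, List.map_map, Function.comp]
    · rw [dif_neg hs, if_neg hs]

theorem pyBitLength_pos (n : Nat) (h : n ≠ 0) : 0 < pyBitLength n := by
  rw [pyBitLength]
  simp [h]

-- the recursive view has a closed form: rounds o+1, o+2, … with sizes s>>1, s>>2, …
theorem bTailAux_closed (round_winners : List (String × String)) :
    ∀ (s : Nat) (o : Int),
      bTailAux round_winners o s
      = (List.range (pyBitLength s - 1)).map
          (fun i => (o + Int.ofNat i + 1, bRound round_winners (o + Int.ofNat i) (s >>> (i + 1)))) := by
  intro s
  induction s using Nat.strong_induction_on with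
  | _ s ih =>
    intro o
    rw [bTailAux]
    by_cases hs : s > 1
    · rw [if_pos hs]
      have hbl : pyBitLength s = pyBitLength (s / 2) + 1 := by
        rw [pyBitLength, if_neg (by omega : ¬ s = 0)]
      have hpos : 0 < pyBitLength (s / 2) := pyBitLength_pos _ (by omega)
      have hsh2 : s >>> 1 = s / 2 := by simp [Nat.shiftRight_succ, Nat.shiftRight_zero]
      rw [hbl, Nat.add_sub_cancel,
        show pyBitLength (s / 2) = (pyBitLength (s / 2) - 1) + 1 by omega,
        List.range_succ_eq_map, List.map_cons, List.map_map]
      congr 1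
      · simp [hsh2]
      · rw [ih (s / 2) (by omega) (o + 1)]
        refine List.map_congr_left (fun i hi => ?_)
        simp only [Function.comp_apply, Nat.succ_eq_add_one, Prod.mk.injEq]
        have hsh : s >>> (i + 1 + 1) = (s / 2) >>> (i + 1) := by
          rw [show i + 1 + 1 = 1 + (i + 1) by ring, Nat.shiftRight_add, hsh2]
        refine ⟨by simp only [Int.ofNat_eq_natCast]; push_cast; ring, ?_⟩
        rw [hsh]
        congr 1
        simp only [Int.ofNat_eq_natCast]; push_cast; ring
    · rw [if_neg hs]
      have : pyBitLength s ≤ 1 := by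
        interval_cases s <;> simp [pyBitLength]
      have hz : pyBitLength s - 1 = 0 := by omega
      rw [hz]
      simp

-- ===== VERDICT (by name: the statement is the Claim_ definition above) =====
theorem compute_round_participants_py_spec : Claim_equal_compute_round_participants_py := by
  intro bracket_data round_winners _
  unfold Spec_compute_round_participants_py
  unfold compute_round_participants_py compute_round_participants_py_alt
  by_cases hbd : bracket_data = []
  · subst hbd
    simp [pyBitLength]
  · rw [if_neg hbd]
    have hn : bracket_data.length ≠ 0 := by
      simpa [List.length_eq_zero_iff] using hbd
    have hpos : 0 < pyBitLength bracket_data.length := pyBitLength_pos _ hn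
    rw [show pyBitLength bracket_data.length = (pyBitLength bracket_data.length - 1) + 1 by omega,
      List.range_succ_eq_map, List.map_cons, List.map_map, List.cons.injEq]
    refine ⟨by simp, ?_⟩
    have hkeys : ((PySem.List.enumerate bracket_data).map
        (fun mp => (mp.1, (PySem.Dict.mk mp.2).getD "a" "", (PySem.Dict.mk mp.2).getD "b" ""))).map Prod.fst
        = (List.range bracket_data.length).map Int.ofNat := by
      rw [List.map_map]
      show (PySem.List.enumerate bracket_data).map (·.1) = _
      rw [PySem.List.map_fst_enumerate, PySem.List.pyRange_one]
      simp [Int.ofNat_eq_natCast]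
    rw [aWhile_eq_bTailAux round_winners bracket_data.length 0 _ hkeys,
      bTailAux_closed round_winners bracket_data.length 0]
    refine List.map_congr_left (fun i hi => ?_)
    simp only [Function.comp_apply, Nat.succ_eq_add_one, if_neg (by omega : ¬ i + 1 = 0),
      Prod.mk.injEq]
    refine ⟨by simp only [Int.ofNat_eq_natCast]; push_cast; ring, ?_⟩
    congr 1
    simp only [Int.ofNat_eq_natCast]; push_cast; ring
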